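-- pv_equiv track=rewrite | github.com/crazytalker-Roy/gocalma-shield | app_1.py | mask_id_like
-- ===== SOURCE A (Python) =====
-- def mask_id_like(id_str: str) -> str:
--     """IDs/Cards: preserves dashes/spaces, replaces middle alphanumerics with '*'"""
--     total_alnum = sum(1 for c in id_str if c.isalnum())
--
--     # 🛡️ Fragment Protection Mechanism
--     # If the input string has <=4 alphanumeric characters remaining (e.g., tail digits 4321),
--     # return it as is to prevent NLP models from re-masking it into ****.
--     if total_alnum <= 4:
--         return id_str
--
--     keep_front = 2 if total_alnum <= 9 else 4
--     keep_back = 2 if total_alnum <= 9 else 4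
--
--     res =[]
--     idx = 0
--     for c in id_str:
--         if c.isalnum():
--             if idx < keep_front or idx >= total_alnum - keep_back:
--                 res.append(c)
--             else:
--                 res.append('*')
--             idx += 1
--         else:
--             res.append(c)
--     return "".join(res)
-- ===== SOURCE B (Python) =====
-- def mask_id_like(id_str: str) -> str:
--     """IDs/Cards: preserves dashes/spaces, replaces middle alphanumerics with '*'"""
--     alnum = [c for c in id_str if c.isalnum()]
--     total = len(alnum)
--     if total <= 4:
--         return id_str
--     k = 2 if total <= 9 else 4
--     masked = alnum[:k] + ['*'] * (total - 2 * k) + alnum[total - k:]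
--     it = iter(masked)
--     return ''.join(next(it) if c.isalnum() else c for c in id_str)
-- ===== Notes on version B (the rewrite author's own statement) =====
-- stated objective: alternative
-- what changed: B extracts the alphanumeric subsequence, builds its masked form once by slicing (front slice + '*' block + back slice), and merges it back into the string, replacing A's per-character running-counter branch logic.
import Mathlib
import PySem

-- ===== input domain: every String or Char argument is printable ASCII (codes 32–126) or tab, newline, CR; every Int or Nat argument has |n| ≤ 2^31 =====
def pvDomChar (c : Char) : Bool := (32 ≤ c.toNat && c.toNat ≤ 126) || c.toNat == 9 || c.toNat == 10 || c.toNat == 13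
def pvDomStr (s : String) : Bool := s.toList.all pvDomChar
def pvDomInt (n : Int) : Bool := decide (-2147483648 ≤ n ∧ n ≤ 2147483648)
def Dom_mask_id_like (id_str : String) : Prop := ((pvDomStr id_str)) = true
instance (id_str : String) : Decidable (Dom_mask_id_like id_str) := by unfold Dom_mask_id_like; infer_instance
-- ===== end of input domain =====

-- B builds the masked alphanumeric subsequence once by slicing and merges it back,
-- instead of A's per-character running-counter branch; objective: alternative decomposition.

-- ===== PORT A =====
-- A's masking loop: running alnum index idx, keep if idx < kf or idx ≥ T - kb.
def maskGoA (kf kb T : Nat) : List Char → Nat → List Char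
  | [], _ => []
  | c :: cs, idx =>
    if PySem.Chars.isalnum c then
      (if idx < kf ∨ T - kb ≤ idx then c else '*') :: maskGoA kf kb T cs (idx + 1)
    else
      c :: maskGoA kf kb T cs idx

def mask_id_like (id_str : String) : String :=
  let total_alnum := id_str.toList.countP PySem.Chars.isalnum   -- sum(1 for c if c.isalnum())
  if total_alnum ≤ 4 then id_str
  else
    let keep_front := if total_alnum ≤ 9 then 2 else 4
    let keep_back := if total_alnum ≤ 9 then 2 else 4
    String.mk (maskGoA keep_front keep_back total_alnum id_str.toList 0)

-- ===== PORT B =====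
-- merge of Source B's final join: 'next(it) if c.isalnum() else c'.  Exact on every reachable
-- input: the iterator holds exactly one element per alnum char of the string, so the
-- [] branch (Python would raise StopIteration) is never reached.
def mergeB : List Char → List Char → List Char
  | [], _ => []
  | c :: cs, ms =>
    if PySem.Chars.isalnum c then
      (match ms with
       | m :: rest => m :: mergeB cs rest
       | [] => [])
    else c :: mergeB cs ms

def mask_id_like_alt (id_str : String) : String :=
  let alnum := id_str.toList.filter PySem.Chars.isalnum
  let total := alnum.length
  if total ≤ 4 then id_str
  else
    let k := if total ≤ 9 then 2 else 4
    let masked := alnum.take k ++ List.replicate (total - 2 * k) '*' ++ alnum.drop (total - k)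
    String.mk (mergeB id_str.toList masked)

-- ===== PRECONDITION & SPEC =====
def Spec_mask_id_like (id_str : String) (out : String) : Prop := out = mask_id_like_alt id_str
instance (id_str : String) (out : String) : Decidable (Spec_mask_id_like id_str out) := by unfold Spec_mask_id_like; infer_instance

-- ===== CLAIM (what is proved, stated in full; the proofs are below) =====
def Claim_equal_mask_id_like : Prop := ∀ (id_str : String), Dom_mask_id_like id_str → Spec_mask_id_like id_str (mask_id_like id_str)

-- ===== LEMMAS AND PROOFS =====

-- the mask applied to the alnum subsequence, position by position, starting at idx
def applyMask (kf kb T : Nat) : Nat → List Char → List Char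
  | _, [] => []
  | idx, c :: rest => (if idx < kf ∨ T - kb ≤ idx then c else '*') :: applyMask kf kb T (idx + 1) rest

theorem applyMask_length (kf kb T : Nat) : ∀ (l : List Char) (idx : Nat),
    (applyMask kf kb T idx l).length = l.length := by
  intro l
  induction l with
  | nil => intro idx; rfl
  | cons c rest ih => intro idx; simp [applyMask, ih]

theorem applyMask_getElem (kf kb T : Nat) : ∀ (l : List Char) (idx i : Nat)
    (h : i < (applyMask kf kb T idx l).length) (h' : i < l.length),
    (applyMask kf kb T idx l)[i] = if idx + i < kf ∨ T - kb ≤ idx + i then l[i] else '*' := by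
  intro l
  induction l with
  | nil => intro idx i h h'; simp at h'
  | cons c rest ih =>
    intro idx i h h'
    cases i with
    | zero => simp [applyMask]
    | succ j =>
      have hr : j < rest.length := by simp at h'; omega
      simp only [applyMask, List.getElem_cons_succ]
      have he : idx + 1 + j = idx + (j + 1) := by omega
      rw [ih (idx + 1) j (by simpa [applyMask_length] using hr) hr, he]

-- A's running-counter loop equals B's merge of the pre-masked subsequence
theorem goA_eq_merge (kf kb T : Nat) : ∀ (cs : List Char) (idx : Nat),
    maskGoA kf kb T cs idx
      = mergeB cs (applyMask kf kb T idx (cs.filter PySem.Chars.isalnum)) := by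
  intro cs
  induction cs with
  | nil => intro idx; rfl
  | cons c rest ih =>
    intro idx
    by_cases hc : PySem.Chars.isalnum c
    · simp [maskGoA, mergeB, hc, applyMask, ih]
    · simp [maskGoA, mergeB, hc, ih]

-- B's sliced mask equals the positional mask, for kf = kb = k with 2k ≤ T
theorem slices_eq_applyMask (k : Nat) (a : List Char) (hT : 2 * k ≤ a.length) :
    a.take k ++ List.replicate (a.length - 2 * k) '*' ++ a.drop (a.length - k)
      = applyMask k k a.length 0 a := by
  apply List.ext_getElem
  · simp [applyMask_length]; omega
  · intro i h1 h2
    have hlen : i < a.length := by simpa [applyMask_length] using h2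
    rw [applyMask_getElem k k a.length a 0 i h2 hlen]
    simp only [Nat.zero_add]
    by_cases hfront : i < k
    · rw [List.getElem_append_left, List.getElem_append_left, List.getElem_take]
      · simp [hfront]
      · simpa [List.length_take] using (by omega : i < min k a.length)
      · simp [List.length_take, List.length_replicate]; omega
    · by_cases hback : a.length - k ≤ i
      · rw [List.getElem_append_right, List.getElem_drop, if_pos (Or.inr hback)]
        · congr 1
          simp [List.length_take, List.length_replicate]
          omega
        · simp [List.length_take, List.length_replicate]; omega
      · rw [List.getElem_append_left, List.getElem_append_right, List.getElem_replicate]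
        · simp; omega
        · simp [List.length_take]; omega
        · simp [List.length_take, List.length_replicate]; omega

-- ===== VERDICT (by name: the statement is the Claim_ definition above) =====
theorem mask_id_like_spec : Claim_equal_mask_id_like := by
  intro s _
  unfold Spec_mask_id_like mask_id_like mask_id_like_alt
  rw [List.countP_eq_length_filter]
  set a := s.toList.filter PySem.Chars.isalnum with ha
  by_cases h4 : a.length ≤ 4
  · simp [h4]
  · simp only [h4, if_false]
    by_cases h9 : a.length ≤ 9
    · have hk : 2 * 2 ≤ a.length := by omega
      simp only [h9, if_true]
      rw [goA_eq_merge, ← ha, ← slices_eq_applyMask 2 a hk]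
    · have hk : 2 * 4 ≤ a.length := by omega
      simp only [h9, if_false]
      rw [goA_eq_merge, ← ha, ← slices_eq_applyMask 4 a hk]
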